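-- pv_equiv track=rewrite | github.com/LotusHacks-PolEdu/poledu-app | material_collection/listening_gen.py | parse_audio_script
-- ===== SOURCE A (Python) =====
-- def parse_audio_script(audio_script: str) -> list[dict]:
--     conversation = []
--     first_speaker_label = None
--
--     for raw_line in audio_script.splitlines():
--         line = raw_line.strip()
--         if not line:
--             continue
--
--         if ":" in line:
--             speaker_label, text = line.split(":", 1)
--             speaker_label = speaker_label.strip()
--             text = text.strip()
--         else:
--             speaker_label = first_speaker_label or "Narrator"
--             text = line
--
--         if not text:
--             continue
--
--         if first_speaker_label is None:
--             first_speaker_label = speaker_label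
--
--         speaker_role = "agent" if speaker_label == first_speaker_label else "customer"
--         conversation.append({"speaker": speaker_role, "text": text, "speaker_label": speaker_label})
--
--     if not conversation:
--         raise ValueError("Listening audio_script is empty or could not be parsed into dialogue lines")
--     return conversation
-- ===== SOURCE B (Python) =====
-- def parse_audio_script(audio_script: str) -> list[dict]:
--     # pass 1: parse lines into (label-or-None, text) records
--     records = []
--     for raw_line in audio_script.splitlines():
--         line = raw_line.strip()
--         if not line:
--             continue
--         if ":" in line:
--             label, text = line.split(":", 1)
--             label, text = label.strip(), text.strip()
--             if text:
--                 records.append((label, text))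
--         else:
--             records.append((None, line))
--     if not records:
--         raise ValueError("Listening audio_script is empty or could not be parsed into dialogue lines")
--     first_label = records[0][0]
--     anchor = first_label if first_label is not None else "Narrator"
--
--     # pass 2: render records against the fixed anchor
--     def render(rec):
--         label, text = rec
--         speaker_label = label if label is not None else (anchor or "Narrator")
--         role = "agent" if speaker_label == anchor else "customer"
--         return {"speaker": role, "text": text, "speaker_label": speaker_label}
--
--     return [render(rec) for rec in records]
-- ===== Notes on version B (the rewrite author's own statement) =====
-- stated objective: alternative
-- what changed: A's single stateful loop with a mutable first_speaker_label interleaving parsing and rendering is replaced by a two-pass decomposition: first parse lines into (label-or-None, text) records, then fix the anchor label once from the first record and map records to output dicts.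
import Mathlib
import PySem

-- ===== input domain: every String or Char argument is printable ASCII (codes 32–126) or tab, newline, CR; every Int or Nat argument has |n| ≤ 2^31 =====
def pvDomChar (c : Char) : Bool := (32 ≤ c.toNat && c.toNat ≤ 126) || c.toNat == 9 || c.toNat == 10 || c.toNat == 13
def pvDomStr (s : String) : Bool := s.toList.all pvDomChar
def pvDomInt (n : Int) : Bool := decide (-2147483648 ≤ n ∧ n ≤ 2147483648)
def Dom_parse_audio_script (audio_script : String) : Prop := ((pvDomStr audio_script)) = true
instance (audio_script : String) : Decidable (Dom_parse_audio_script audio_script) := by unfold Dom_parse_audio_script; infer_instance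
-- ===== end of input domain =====

-- B replaces A's single stateful loop (mutable first_speaker_label) by a parse-then-render
-- two-pass decomposition: collect (label?, text) records, fix the anchor once, then map to dicts.


-- ===== PORT A =====
-- loop body of A's for-loop; state = (conversation, first_speaker_label)
def pvStepA (st : List (List (String × String)) × Option String) (raw_line : String) :
    List (List (String × String)) × Option String :=
  let line := PySem.Str.strip raw_line
  if line = "" then st
  else
    let pair : Option (String × String) :=
      if PySem.Str.isIn ":" line then
        match PySem.Str.splitMax? line ":" 1 with
        | some (a :: b :: _) => some (PySem.Str.strip a, PySem.Str.strip b)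
        | _ => none            -- unreachable unpacking guard (split with ":" present yields 2 pieces)
      else
        some ((match st.2 with        -- first_speaker_label or "Narrator"  (Python truthiness of str)
               | some l => if l = "" then "Narrator" else l
               | none => "Narrator"), line)
    match pair with
    | none => st
    | some (speaker_label, text) =>
      if text = "" then st
      else
        let first_speaker_label : Option String :=
          match st.2 with | none => some speaker_label | some l => some l
        let speaker_role := if some speaker_label = first_speaker_label then "agent" else "customer"
        (st.1 ++ [[("speaker", speaker_role), ("text", text), ("speaker_label", speaker_label)]],
         first_speaker_label)

def parse_audio_script (audio_script : String) : List (List (String × String)) :=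
  ((PySem.Str.splitlines audio_script).foldl pvStepA ([], none)).1
  -- Python raises ValueError when the result list is empty: excluded by Pre_ below.

-- ===== PORT B =====
-- pass 1 per-line parser: none = line skipped, some (label?, text) = kept record
def pvParseLine (raw_line : String) : Option (Option String × String) :=
  let line := PySem.Str.strip raw_line
  if line = "" then none
  else if PySem.Str.isIn ":" line then
    match PySem.Str.splitMax? line ":" 1 with
    | some (a :: b :: _) =>
      let text := PySem.Str.strip b
      if text = "" then none else some (some (PySem.Str.strip a), text)
    | _ => none              -- unreachable unpacking guard
  else some (none, line)

-- pass 2 renderer against the fixed anchor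
def pvRender (anchor : String) (rec : Option String × String) : List (String × String) :=
  let speaker_label :=
    match rec.1 with
    | some l => l
    | none => if anchor = "" then "Narrator" else anchor   -- anchor or "Narrator"
  [("speaker", if speaker_label = anchor then "agent" else "customer"),
   ("text", rec.2), ("speaker_label", speaker_label)]

def parse_audio_script_alt (audio_script : String) : List (List (String × String)) :=
  let records := (PySem.Str.splitlines audio_script).filterMap pvParseLine
  match records with
  | [] => []                -- Python raises ValueError here: excluded by Pre_ below
  | r :: _ =>
    let anchor := match r.1 with | some l => l | none => "Narrator"
    records.map (pvRender anchor)

-- ===== PRECONDITION & SPEC =====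
-- Pre_ excludes exactly the inputs where Python A raises ValueError: scripts in which no line
-- survives (every line strips to empty, or has ":" with nothing but whitespace after it).
def Pre_parse_audio_script (audio_script : String) : Prop :=
  ((PySem.Str.splitlines audio_script).any (fun raw =>
    let line := PySem.Str.strip raw
    (!(line == "")) &&
      (if PySem.Str.isIn ":" line then
        (match PySem.Str.splitMax? line ":" 1 with
         | some (_ :: b :: _) => !(PySem.Str.strip b == "")
         | _ => false)
       else true))) = true
instance (audio_script : String) : Decidable (Pre_parse_audio_script audio_script) := by
  unfold Pre_parse_audio_script; infer_instance

def pvWitness_parse_audio_script : String := "Anna: hi\nthere\nBob: yo"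

def Spec_parse_audio_script (audio_script : String) (out : List (List (String × String))) : Prop := out = parse_audio_script_alt audio_script
instance (audio_script : String) (out : List (List (String × String))) : Decidable (Spec_parse_audio_script audio_script out) := by unfold Spec_parse_audio_script; infer_instance

-- ===== CLAIM (what is proved, stated in full; the proofs are below) =====
def Claim_equal_parse_audio_script : Prop := ∀ (audio_script : String), Dom_parse_audio_script audio_script → Pre_parse_audio_script audio_script → Spec_parse_audio_script audio_script (parse_audio_script audio_script)

-- ===== LEMMAS AND PROOFS =====

def pvAnchor (rec : Option String × String) : String :=
  match rec.1 with | some l => l | none => "Narrator"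

-- A's loop body, characterised through B's per-line parser
theorem pvStepA_eq (st : List (List (String × String)) × Option String) (raw : String) :
    pvStepA st raw =
      match pvParseLine raw, st.2 with
      | none, _ => st
      | some rec, some a => (st.1 ++ [pvRender a rec], some a)
      | some rec, none => (st.1 ++ [pvRender (pvAnchor rec) rec], some (pvAnchor rec)) := by
  unfold pvStepA pvParseLine
  by_cases h0 : PySem.Str.strip raw = ""
  · simp [h0]
  · simp only [h0, if_false]
    by_cases hc : PySem.Str.isIn ":" (PySem.Str.strip raw) = true
    · simp only [hc, if_true]
      cases hs : PySem.Str.splitMax? (PySem.Str.strip raw) ":" 1 with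
      | none => cases st.2 <;> simp
      | some ps =>
        match ps with
        | [] => cases st.2 <;> simp
        | [a] => cases st.2 <;> simp
        | a :: b :: rest =>
          by_cases ht : PySem.Str.strip b = ""
          · cases st.2 <;> simp [ht]
          · cases hfs : st.2 with
            | none => simp [ht, pvRender, pvAnchor]
            | some l => simp [ht, pvRender]
    · simp only [hc, Bool.false_eq_true, if_false]
      cases hfs : st.2 with
      | none => simp [h0, pvRender, pvAnchor]
      | some l =>
        by_cases hl : l = ""
        · simp [h0, hl, pvRender]
          decide
        · simp [h0, hl, pvRender]

-- steady state: once first_speaker_label is fixed at a, the loop just appends rendered records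
theorem foldA_some (lines : List String) (conv : List (List (String × String))) (a : String) :
    lines.foldl pvStepA (conv, some a) =
      (conv ++ (lines.filterMap pvParseLine).map (pvRender a), some a) := by
  induction lines generalizing conv with
  | nil => simp
  | cons raw rest ih =>
    rw [List.foldl_cons, pvStepA_eq]
    cases hp : pvParseLine raw with
    | none => simp [hp, ih]
    | some rec => simp [hp, ih]

-- startup: from the initial state, the anchor is the first kept record's resolved label
theorem foldA_none (lines : List String) :
    lines.foldl pvStepA ([], none) =
      (match lines.filterMap pvParseLine with
       | [] => (([] : List (List (String × String))), (none : Option String))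
       | r :: rs => ((r :: rs).map (pvRender (pvAnchor r)), some (pvAnchor r))) := by
  induction lines with
  | nil => simp
  | cons raw rest ih =>
    rw [List.foldl_cons, pvStepA_eq]
    cases hp : pvParseLine raw with
    | none => simp [hp, ih]
    | some rec => simp [hp, foldA_some]

-- ===== VERDICT (by name: the statement is the Claim_ definition above) =====
theorem parse_audio_script_spec : Claim_equal_parse_audio_script := by
  intro s _ _
  unfold Spec_parse_audio_script parse_audio_script parse_audio_script_alt
  rw [foldA_none]
  cases h : (PySem.Str.splitlines s).filterMap pvParseLine with
  | nil => simp
  | cons r rs => simp [pvAnchor]
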